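-- pv_equiv track=rewrite | github.com/hatemile/hatemile-for-python | hatemile/implementation/assoc.py | _validate_header
-- ===== SOURCE A (Python) =====
-- def _validate_header(hed):
--     """
--     Validate the list that represents the table header.
--
--     :param hed: The list that represents the table header.
--     :type hed: list(list(hatemile.util.html.htmldomelement.HTMLDOMElement))
--     :return: True if the table header is valid or False if the table header
--              is not valid.
--     :rtype: bool
--     """
--     # pylint: disable=no-self-use
--
--     if not bool(hed):
--         return False
--     length = -1
--     for row in hed:
--         if not bool(row):
--             return False
--         elif length == -1:
--             length = len(row)
--         elif len(row) != length:
--             return False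
--     return True
-- ===== SOURCE B (Python) =====
-- def _validate_header(hed):
--     lens = [len(row) for row in hed]
--     return bool(lens) and min(lens) > 0 and sum(lens) == len(lens) * max(lens)
-- ===== Notes on version B (the rewrite author's own statement) =====
-- stated objective: alternative
-- what changed: Replaces the sentinel-threading early-exit loop with an arithmetic aggregate test: collect the row lengths once and return True iff the list is non-empty, min(lens) > 0, and sum(lens) == len(lens) * max(lens) (each length is at most the max, so the sum equals n*max exactly when all lengths are equal).
import Mathlib
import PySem

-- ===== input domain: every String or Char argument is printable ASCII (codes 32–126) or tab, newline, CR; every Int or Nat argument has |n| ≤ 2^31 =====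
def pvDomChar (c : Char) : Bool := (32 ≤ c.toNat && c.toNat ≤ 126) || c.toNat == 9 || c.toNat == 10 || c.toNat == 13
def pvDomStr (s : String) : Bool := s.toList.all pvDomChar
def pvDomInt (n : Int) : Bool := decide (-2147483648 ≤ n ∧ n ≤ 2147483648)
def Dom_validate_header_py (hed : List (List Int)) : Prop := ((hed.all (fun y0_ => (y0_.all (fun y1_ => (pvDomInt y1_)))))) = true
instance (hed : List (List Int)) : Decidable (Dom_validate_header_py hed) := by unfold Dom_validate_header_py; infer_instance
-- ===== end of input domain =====

-- B replaces A's sentinel-threading early-exit loop with an aggregate arithmetic test (min>0 and sum == n*max over the row lengths); alternative decomposition, same O(n) cost.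


-- ===== PORT A =====
-- the for-loop with its early returns and the threaded sentinel `length`
def validateLoopA (length : Int) : List (List Int) → Bool
  | [] => true
  | row :: rest =>
    if row.isEmpty then false
    else if length == -1 then validateLoopA ((row.length : Int)) rest
    else if ((row.length : Int)) != length then false
    else validateLoopA length rest

def validate_header_py (hed : List (List Int)) : Bool :=
  if hed.isEmpty then false else validateLoopA (-1) hed

-- ===== PORT B =====
def validate_header_py_alt (hed : List (List Int)) : Bool :=
  let lens := hed.map (fun row => ((row.length : Int)))
  !lens.isEmpty &&
    (match PySem.List.min? lens (fun x => x), PySem.List.max? lens (fun x => x) with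
     | some mn, some mx =>
         decide (0 < mn) && (lens.sum == ((lens.length : Int)) * mx)
     | _, _ => false)

-- ===== PRECONDITION & SPEC =====
def Spec_validate_header_py (hed : List (List Int)) (out : Bool) : Prop := out = validate_header_py_alt hed
instance (hed : List (List Int)) (out : Bool) : Decidable (Spec_validate_header_py hed out) := by unfold Spec_validate_header_py; infer_instance

-- ===== CLAIM (what is proved, stated in full; the proofs are below) =====
def Claim_equal_validate_header_py : Prop := ∀ (hed : List (List Int)), Dom_validate_header_py hed → Spec_validate_header_py hed (validate_header_py hed)

-- ===== LEMMAS AND PROOFS =====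

-- A's loop after the sentinel has been replaced by the first row's length L ≥ 0
theorem loopA_char (L : Int) (hL : 0 ≤ L) (xs : List (List Int)) :
    validateLoopA L xs = xs.all (fun row => !row.isEmpty && ((row.length : Int) == L)) := by
  induction xs with
  | nil => simp [validateLoopA]
  | cons r rest ih =>
    simp only [validateLoopA, List.all_cons]
    by_cases hr : r.isEmpty
    · simp [hr]
    · have hne : (L == -1) = false := by
        simp only [beq_eq_false_iff_ne]; omega
      by_cases hlen : ((r.length : Int)) = L
      · simp [hr, hne, hlen, ih]
      · simp [hr, hne, hlen]

-- a list of ints, each at most m, sums to at most length * m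
theorem sum_le_len_mul (l : List Int) (m : Int) (h : ∀ z ∈ l, z ≤ m) :
    l.sum ≤ ((l.length : Int)) * m := by
  induction l with
  | nil => simp
  | cons a t ih =>
    have ha : a ≤ m := h a (by simp)
    have ht : t.sum ≤ ((t.length : Int)) * m := ih (fun z hz => h z (by simp [hz]))
    simp only [List.sum_cons, List.length_cons]
    push_cast
    nlinarith

-- equality in that bound forces every element to equal m
theorem all_eq_of_sum (l : List Int) (m : Int) (h : ∀ z ∈ l, z ≤ m)
    (hs : l.sum = ((l.length : Int)) * m) : ∀ z ∈ l, z = m := by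
  induction l with
  | nil => simp
  | cons a t ih =>
    have ha : a ≤ m := h a (by simp)
    have ht : ∀ z ∈ t, z ≤ m := fun z hz => h z (by simp [hz])
    have htb : t.sum ≤ ((t.length : Int)) * m := sum_le_len_mul t m ht
    have hsum : a + t.sum = (((t.length : Int)) + 1) * m := by
      simpa [List.sum_cons, List.length_cons, Int.natCast_succ] using hs
    have ham : a = m := by nlinarith
    have hts : t.sum = ((t.length : Int)) * m := by nlinarith
    intro z hz
    rcases List.mem_cons.mp hz with h1 | h2
    · simpa [h1] using ham
    · exact ih ht hts z h2

theorem foldl_min_const (x : Int) (xs : List Int) (h : ∀ y ∈ xs, y = x) :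
    xs.foldl min x = x := by
  induction xs with
  | nil => rfl
  | cons a t ih =>
    have ha : a = x := h a (by simp)
    simp only [List.foldl_cons, ha, min_self]
    exact ih (fun y hy => h y (by simp [hy]))

theorem foldl_max_const (x : Int) (xs : List Int) (h : ∀ y ∈ xs, y = x) :
    xs.foldl max x = x := by
  induction xs with
  | nil => rfl
  | cons a t ih =>
    have ha : a = x := h a (by simp)
    simp only [List.foldl_cons, ha, max_self]
    exact ih (fun y hy => h y (by simp [hy]))

theorem sum_const_eq (x : Int) (xs : List Int) (h : ∀ y ∈ xs, y = x) :
    xs.sum = ((xs.length : Int)) * x := by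
  induction xs with
  | nil => simp
  | cons a t ih =>
    have ha : a = x := h a (by simp)
    have ht := ih (fun y hy => h y (by simp [hy]))
    simp only [List.sum_cons, List.length_cons, ha, ht]
    push_cast; ring

theorem le_foldl_max' (x : Int) (xs : List Int) :
    ∀ z ∈ x :: xs, z ≤ xs.foldl max x := by
  induction xs generalizing x with
  | nil => simp
  | cons a t ih =>
    intro z hz
    have step : ∀ w ∈ (max x a) :: t, w ≤ t.foldl max (max x a) := ih (max x a)
    rcases List.mem_cons.mp hz with h1 | h2
    · calc z = x := h1
        _ ≤ max x a := le_max_left _ _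
        _ ≤ t.foldl max (max x a) := step _ (by simp)
    · rcases List.mem_cons.mp h2 with h3 | h4
      · calc z = a := h3
          _ ≤ max x a := le_max_right _ _
          _ ≤ t.foldl max (max x a) := step _ (by simp)
      · exact step z (by simp [h4])

-- the core arithmetic characterisation: "head positive and all equal to head"
-- versus "min positive and sum equals length times max"
theorem agg_char (x : Int) (xs : List Int) :
    (decide (0 < x) && xs.all (fun y => y == x)) =
    (decide (0 < xs.foldl min x) &&
      ((x + xs.sum) == (((xs.length : Int)) + 1) * (xs.foldl max x))) := by
  by_cases hall : ∀ y ∈ xs, y = x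
  · have hmin := foldl_min_const x xs hall
    have hmax := foldl_max_const x xs hall
    have hsum := sum_const_eq x xs hall
    have hx : xs.all (fun y => y == x) = true := by
      simp only [List.all_eq_true]; intro y hy; simpa using hall y hy
    have heq : (x + xs.sum) = (((xs.length : Int)) + 1) * (xs.foldl max x) := by
      rw [hmax, hsum]; ring
    simp [hx, hmin, heq]
  · have hx : xs.all (fun y => y == x) = false := by
      simp only [List.all_eq_false]
      have hex : ∃ y, y ∈ xs ∧ y ≠ x := by
        by_contra hc
        apply hall
        intro y hy
        by_contra hne
        exact hc ⟨y, hy, hne⟩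
      obtain ⟨y, hy, hne⟩ := hex
      exact ⟨y, hy, by simpa using hne⟩
    have hne : (x + xs.sum) ≠ (((xs.length : Int)) + 1) * (xs.foldl max x) := by
      intro heq
      have hle := le_foldl_max' x xs
      have hsum : (x :: xs).sum = (((x :: xs).length : Int)) * (xs.foldl max x) := by
        simp only [List.sum_cons, List.length_cons]
        push_cast
        linarith [heq]
      have hae := all_eq_of_sum (x :: xs) (xs.foldl max x) hle hsum
      have hxm : x = xs.foldl max x := hae x (by simp)
      apply hall
      intro y hy
      have := hae y (by simp [hy])
      omega
    have : ((x + xs.sum) == (((xs.length : Int)) + 1) * (xs.foldl max x)) = false := by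
      simpa using hne
    simp [hx, this]

theorem split_nonempty (L : Nat) (hL : L ≠ 0) (rest : List (List Int)) :
    rest.all (fun row => !row.isEmpty && ((row.length : Int) == ((L : Int)))) =
    rest.all (fun row => ((row.length : Int)) == ((L : Int))) := by
  induction rest with
  | nil => rfl
  | cons a t ih =>
    simp only [List.all_cons, ih]
    congr 1
    by_cases h : ((a.length : Int)) = ((L : Int))
    · have hrow : ¬ a.isEmpty := by
        simp only [List.isEmpty_iff]
        intro h0
        rw [h0] at h
        simp only [List.length_nil, Nat.cast_zero] at h
        omega
      simp [h, hrow]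
    · simp [h]

theorem foldl_min_le_init (x : Int) (xs : List Int) : xs.foldl min x ≤ x := by
  induction xs generalizing x with
  | nil => simp
  | cons a t ih => exact le_trans (ih (min x a)) (min_le_left _ _)

-- ===== VERDICT (by name: the statement is the Claim_ definition above) =====
theorem validate_header_py_spec : Claim_equal_validate_header_py := by
  intro hed _
  unfold Spec_validate_header_py validate_header_py validate_header_py_alt
  cases hed with
  | nil => simp
  | cons r rest =>
    simp only [List.isEmpty_cons, if_neg Bool.false_ne_true, List.map_cons,
      Bool.not_false, Bool.true_and, PySem.List.min?_id_cons, PySem.List.max?_id_cons]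
    by_cases hr : r.isEmpty
    · have hr0 : r.length = 0 := by
        have : r = [] := by simpa [List.isEmpty_iff] using hr
        simp [this]
      have hmin : decide ((0 : Int) < (rest.map (fun row => ((row.length : Int)))).foldl min ((r.length : Int))) = false := by
        have hle := foldl_min_le_init ((r.length : Int)) (rest.map (fun row => ((row.length : Int))))
        simp only [decide_eq_false_iff_not, not_lt]
        omega
      simp [validateLoopA, hr, hmin]
    · have hrne : r.length ≠ 0 := by
        intro h0
        have : r = [] := List.length_eq_zero_iff.mp h0
        simp [this] at hr
      have hstep : validateLoopA (-1) (r :: rest) = validateLoopA ((r.length : Int)) rest := by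
        simp [validateLoopA, hr]
      rw [hstep, loopA_char _ (Int.natCast_nonneg _)]
      have hrpos : (decide ((0:Int) < ((r.length : Int)))) = true := by
        simp only [decide_eq_true_eq]
        omega
      have hsplit := split_nonempty r.length hrne rest
      have hs2 : rest.all (fun row => ((row.length : Int)) == ((r.length : Int))) =
          (rest.map (fun row => ((row.length : Int)))).all (fun y => y == ((r.length : Int))) := by
        rw [List.all_map]
        rfl
      rw [hsplit, hs2]
      calc (rest.map (fun row => ((row.length : Int)))).all (fun y => y == ((r.length : Int)))
          = (decide ((0:Int) < ((r.length : Int))) &&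
              (rest.map (fun row => ((row.length : Int)))).all (fun y => y == ((r.length : Int)))) := by
            rw [hrpos, Bool.true_and]
        _ = (decide ((0:Int) < (rest.map (fun row => ((row.length : Int)))).foldl min ((r.length : Int))) &&
              ((((r.length : Int)) + (rest.map (fun row => ((row.length : Int)))).sum) ==
                ((((rest.map (fun row => ((row.length : Int)))).length : Int)) + 1) *
                  (rest.map (fun row => ((row.length : Int)))).foldl max ((r.length : Int)))) :=
            agg_char ((r.length : Int)) (rest.map (fun row => ((row.length : Int))))
        _ = _ := by
            simp only [List.sum_cons, List.length_cons]
            push_cast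
            ring_nf
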